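-- pv_equiv track=rewrite | github.com/DelQuentin/TaxiEye | Tests/SegmentationV3.py | hist2clusters
-- ===== SOURCE A (Python) =====
-- def hist2clusters(hist):
--     clusters = []
--     inCluster = False
--     for i in range(len(hist)):
--         if hist[i] == 0 and inCluster==False:
--             continue
--         elif hist[i] == 0 and inCluster==True:
--             inCluster = False
--         elif hist[i] != 0 and inCluster==False:
--             inCluster = True
--             clusters.append([])
--             clusters[-1].append([i,hist[i]])
--         else:
--             clusters[-1].append([i,hist[i]])
--     return clusters
-- ===== SOURCE B (Python) =====
-- def hist2clusters(hist):
--     # Run-splitting pass: skip zeros; for each maximal nonzero run pairs[j:k],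
--     # emit it whole as one cluster (no state flag, no 4-way branch).
--     clusters = []
--     pairs = list(enumerate(hist))
--     n = len(pairs)
--     j = 0
--     while j < n:
--         if pairs[j][1] == 0:
--             j += 1
--         else:
--             k = j
--             while k < n and pairs[k][1] != 0:
--                 k += 1
--             clusters.append([[i, v] for i, v in pairs[j:k]])
--             j = k
--     return clusters
-- ===== Notes on version B (the rewrite author's own statement) =====
-- stated objective: alternative
-- what changed: Replaces A's inCluster boolean state machine with its four-way branch by a run-splitting pass: walk the enumerated list, skip zeros, and slice off each maximal nonzero run as a whole cluster.
import Mathlib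
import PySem

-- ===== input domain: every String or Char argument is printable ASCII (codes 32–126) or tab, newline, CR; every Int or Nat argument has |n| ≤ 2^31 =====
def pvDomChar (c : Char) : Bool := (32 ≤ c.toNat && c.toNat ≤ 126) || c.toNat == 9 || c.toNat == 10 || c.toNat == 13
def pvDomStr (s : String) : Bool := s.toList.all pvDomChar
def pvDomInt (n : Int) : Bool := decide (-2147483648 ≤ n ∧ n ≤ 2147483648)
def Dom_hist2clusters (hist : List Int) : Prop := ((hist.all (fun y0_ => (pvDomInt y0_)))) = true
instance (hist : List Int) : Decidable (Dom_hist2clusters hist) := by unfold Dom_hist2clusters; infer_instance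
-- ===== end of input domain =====

-- B replaces A's inCluster state machine by a run-splitting pass over the enumerated
-- list (skip zeros, slice off each maximal nonzero run whole); same O(n) cost.

-- ===== PORT A =====
-- clusters[-1].append(x): append x to the last cluster (the [] case is unreachable in A,
-- since the else-branch runs only with inCluster == True, after a cluster was appended)
def pvAppendLast (cs : List (List (List Int))) (x : List Int) : List (List (List Int)) :=
  match cs with
  | [] => []
  | [c] => [c ++ [x]]
  | c :: rest => c :: pvAppendLast rest x

-- the loop body, with h = hist[i] passed explicitly
def pvStepA (st : List (List (List Int)) × Bool) (i h : Int) :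
    List (List (List Int)) × Bool :=
  if h = 0 ∧ st.2 = false then st
  else if h = 0 ∧ st.2 = true then (st.1, false)
  else if h ≠ 0 ∧ st.2 = false then (st.1 ++ [[[i, h]]], true)
  else (pvAppendLast st.1 [i, h], st.2)

def hist2clusters (hist : List Int) : List (List (List Int)) :=
  ((PySem.List.pyRange 0 hist.length 1).foldl
      (fun st i => pvStepA st i (PySem.List.pyGetD hist i 0)) ([], false)).1

-- ===== PORT B =====
-- inner while: advance k over the nonzero run, return the final k
def pvFindEnd (pairs : List (Int × Int)) (n : Nat) (k : Nat) : Nat :=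
  if k < n ∧ (pairs.getD k (0, 0)).2 ≠ 0 then pvFindEnd pairs n (k + 1) else k
termination_by n - k

theorem pvFindEnd_le_self (pairs : List (Int × Int)) (n k : Nat) :
    k ≤ pvFindEnd pairs n k := by
  rw [pvFindEnd]
  split
  · exact le_trans (Nat.le_succ k) (pvFindEnd_le_self pairs n (k + 1))
  · exact le_refl k
termination_by n - k

-- outer while over the index j; pairs[j:k] ported with PySem.List.slice (exact: 0 ≤ j ≤ k)
def pvOuterB (pairs : List (Int × Int)) (n : Nat) (j : Nat) : List (List (List Int)) :=
  if hj : j < n then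
    if (pairs.getD j (0, 0)).2 = 0 then pvOuterB pairs n (j + 1)
    else
      let k := pvFindEnd pairs n j
      (PySem.List.slice pairs (some (j : Int)) (some (k : Int))).map (fun p => [p.1, p.2])
        :: pvOuterB pairs n k
  else []
termination_by n - j
decreasing_by
  · omega
  · have h1 : j + 1 ≤ pvFindEnd pairs n j := by
      rw [pvFindEnd, if_pos ⟨hj, ‹¬(pairs.getD j (0, 0)).2 = 0›⟩]
      exact pvFindEnd_le_self pairs n (j + 1)
    omega

def hist2clusters_alt (hist : List Int) : List (List (List Int)) :=
  let pairs := PySem.List.enumerate hist 0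
  pvOuterB pairs pairs.length 0

-- ===== PRECONDITION & SPEC =====
def Spec_hist2clusters (hist : List Int) (out : List (List (List Int))) : Prop := out = hist2clusters_alt hist
instance (hist : List Int) (out : List (List (List Int))) : Decidable (Spec_hist2clusters hist out) := by unfold Spec_hist2clusters; infer_instance

-- ===== CLAIM (what is proved, stated in full; the proofs are below) =====
def Claim_equal_hist2clusters : Prop := ∀ (hist : List Int), Dom_hist2clusters hist → Spec_hist2clusters hist (hist2clusters hist)

-- ===== LEMMAS AND PROOFS =====
-- proof-side model of B: structural run-splitting on the pair list
-- inner while: collect the leading nonzero run, return (run, rest)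
def pvTakeRun : List (Int × Int) → List (Int × Int) × List (Int × Int)
  | [] => ([], [])
  | (i, v) :: rest =>
      if v ≠ 0 then
        let pr := pvTakeRun rest
        ((i, v) :: pr.1, pr.2)
      else ([], (i, v) :: rest)

theorem pvTakeRun_snd_length_le : ∀ l, (pvTakeRun l).2.length ≤ l.length := by
  intro l
  induction l with
  | nil => simp [pvTakeRun]
  | cons p rest ih =>
      obtain ⟨i, v⟩ := p
      by_cases h : v ≠ 0 <;> simp [pvTakeRun, h] <;> omega

-- outer while over rest = list(enumerate(hist))
def pvSplit : List (Int × Int) → List (List (List Int))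
  | [] => []
  | (i, v) :: rest =>
      if v = 0 then pvSplit rest
      else
        let pr := pvTakeRun ((i, v) :: rest)
        pr.1.map (fun p => [p.1, p.2]) :: pvSplit pr.2
termination_by l => l.length
decreasing_by
  · simp
  · simp only [pvTakeRun, if_pos ‹¬v = 0›]
    exact Nat.lt_succ_of_le (pvTakeRun_snd_length_le rest)

theorem pvAppendLast_append (cs : List (List (List Int))) (c : List (List Int)) (x : List Int) :
    pvAppendLast (cs ++ [c]) x = cs ++ [c ++ [x]] := by
  induction cs with
  | nil => rfl
  | cons d rest ih => cases rest <;> simp_all [pvAppendLast]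

theorem pvSplit_nil : pvSplit [] = [] := by
  unfold pvSplit; rfl

theorem pvSplit_cons (i v : Int) (rest : List (Int × Int)) :
    pvSplit ((i, v) :: rest) =
      if v = 0 then pvSplit rest
      else
        let pr := pvTakeRun ((i, v) :: rest)
        pr.1.map (fun p => [p.1, p.2]) :: pvSplit pr.2 := by
  rw [pvSplit]

theorem pvStepA_zf (cls : List (List (List Int))) (i : Int) :
    pvStepA (cls, false) i 0 = (cls, false) := by simp [pvStepA]

theorem pvStepA_zt (cls : List (List (List Int))) (i : Int) :
    pvStepA (cls, true) i 0 = (cls, false) := by simp [pvStepA]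

theorem pvStepA_nf (cls : List (List (List Int))) (i v : Int) (hv : v ≠ 0) :
    pvStepA (cls, false) i v = (cls ++ [[[i, v]]], true) := by simp [pvStepA, hv]

theorem pvStepA_nt (cls : List (List (List Int))) (i v : Int) (hv : v ≠ 0) :
    pvStepA (cls, true) i v = (pvAppendLast cls [i, v], true) := by simp [pvStepA, hv]

theorem pvMain (ps : List (Int × Int)) :
    (∀ cls, (ps.foldl (fun st p => pvStepA st p.1 p.2) (cls, false)).1 = cls ++ pvSplit ps) ∧
    (∀ cs c, (ps.foldl (fun st p => pvStepA st p.1 p.2) (cs ++ [c], true)).1 =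
      cs ++ ((c ++ (pvTakeRun ps).1.map (fun p => [p.1, p.2])) :: pvSplit (pvTakeRun ps).2)) := by
  induction ps with
  | nil => simp [pvSplit_nil, pvTakeRun]
  | cons p rest ih =>
      obtain ⟨i, v⟩ := p
      obtain ⟨ih1, ih2⟩ := ih
      by_cases hv : v = 0
      · subst hv
        constructor
        · intro cls
          rw [List.foldl_cons]
          show (List.foldl _ (pvStepA (cls, false) i 0) rest).1 = _
          rw [pvStepA_zf, pvSplit_cons, if_pos rfl]
          exact ih1 cls
        · intro cs c
          rw [List.foldl_cons]
          show (List.foldl _ (pvStepA (cs ++ [c], true) i 0) rest).1 = _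
          rw [pvStepA_zt, ih1 (cs ++ [c])]
          simp [pvTakeRun, pvSplit_cons]
      · constructor
        · intro cls
          rw [List.foldl_cons]
          show (List.foldl _ (pvStepA (cls, false) i v) rest).1 = _
          rw [pvStepA_nf cls i v hv, ih2 cls [[i, v]], pvSplit_cons, if_neg hv]
          simp [pvTakeRun, hv]
        · intro cs c
          rw [List.foldl_cons]
          show (List.foldl _ (pvStepA (cs ++ [c], true) i v) rest).1 = _
          rw [pvStepA_nt _ i v hv, pvAppendLast_append, ih2 cs (c ++ [[i, v]])]
          simp [pvTakeRun, hv]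

theorem pvFoldA_enum (hist : List Int) :
    (PySem.List.pyRange 0 hist.length 1).foldl
        (fun st i => pvStepA st i (PySem.List.pyGetD hist i 0)) ([], false) =
      (PySem.List.enumerate hist 0).foldl (fun st p => pvStepA st p.1 p.2) ([], false) := by
  rw [PySem.List.enumerate_eq_map_pyRange hist 0, List.foldl_map]
  rfl

theorem pvTakeRun_drop (pairs : List (Int × Int)) (j : Nat) :
    pvTakeRun (pairs.drop j) =
      ((pairs.drop j).take (pvFindEnd pairs pairs.length j - j),
        pairs.drop (pvFindEnd pairs pairs.length j)) := by
  rw [pvFindEnd]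
  split
  · next h =>
      obtain ⟨hj, hv⟩ := h
      have hgd : pairs.getD j (0, 0) = pairs[j] := List.getD_eq_getElem pairs (0, 0) hj
      have hd : pairs.drop j = pairs[j] :: pairs.drop (j + 1) := (List.getElem_cons_drop hj).symm
      have h1 : j + 1 ≤ pvFindEnd pairs pairs.length (j + 1) :=
        pvFindEnd_le_self pairs pairs.length (j + 1)
      have ih := pvTakeRun_drop pairs (j + 1)
      rw [hd]
      cases hab : pairs[j] with
      | mk a b =>
        have hb : b ≠ 0 := by rw [hgd, hab] at hv; exact hv
        simp only [pvTakeRun, if_pos hb, ih]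
        have hK : pvFindEnd pairs pairs.length (j + 1) - j =
            (pvFindEnd pairs pairs.length (j + 1) - (j + 1)) + 1 := by omega
        rw [hK, List.take_succ_cons]
  · next h =>
      by_cases hj : j < pairs.length
      · have hv : (pairs.getD j (0, 0)).2 = 0 := by
          by_contra hv; exact h ⟨hj, hv⟩
        have hgd : pairs.getD j (0, 0) = pairs[j] := List.getD_eq_getElem pairs (0, 0) hj
        have hd : pairs.drop j = pairs[j] :: pairs.drop (j + 1) := (List.getElem_cons_drop hj).symm
        rw [hd]
        cases hab : pairs[j] with
        | mk a b =>
          have hb : ¬ b ≠ 0 := by rw [hgd, hab] at hv; simpa using hv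
          simp only [pvTakeRun, if_neg hb]
          simp [← hab, ← hd]
      · have hnil : pairs.drop j = [] := List.drop_eq_nil_of_le (by omega)
        simp [hnil, pvTakeRun]
termination_by pairs.length - j
decreasing_by omega

theorem pvFindEnd_ge_succ (pairs : List (Int × Int)) (n j : Nat) (hj : j < n)
    (hv : (pairs.getD j (0, 0)).2 ≠ 0) : j + 1 ≤ pvFindEnd pairs n j := by
  rw [pvFindEnd, if_pos ⟨hj, hv⟩]
  exact pvFindEnd_le_self pairs n (j + 1)

theorem pvOuterB_eq_pvSplit (pairs : List (Int × Int)) (j : Nat) :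
    pvOuterB pairs pairs.length j = pvSplit (pairs.drop j) := by
  rw [pvOuterB]
  split
  · next hj =>
      have hgd : pairs.getD j (0, 0) = pairs[j] := List.getD_eq_getElem pairs (0, 0) hj
      have hd : pairs.drop j = pairs[j] :: pairs.drop (j + 1) := (List.getElem_cons_drop hj).symm
      split
      · next hz =>
          rw [pvOuterB_eq_pvSplit pairs (j + 1), hd]
          cases hab : pairs[j] with
          | mk a b =>
            have hb : b = 0 := by rw [hgd, hab] at hz; exact hz
            rw [pvSplit_cons, if_pos hb]
      · next hz =>
          have hK := pvFindEnd_ge_succ pairs pairs.length j hj hz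
          show (PySem.List.slice pairs (some (j : Int))
                (some ((pvFindEnd pairs pairs.length j : Nat) : Int))).map (fun p => [p.1, p.2])
              :: pvOuterB pairs pairs.length (pvFindEnd pairs pairs.length j) =
            pvSplit (pairs.drop j)
          rw [pvOuterB_eq_pvSplit pairs (pvFindEnd pairs pairs.length j)]
          have htr := pvTakeRun_drop pairs j
          conv_rhs => rw [hd]
          cases hab : pairs[j] with
          | mk a b =>
            have hb : b ≠ 0 := by rw [hgd, hab] at hz; exact hz
            rw [pvSplit_cons, if_neg hb]
            rw [show (a, b) :: pairs.drop (j + 1) = pairs.drop j by rw [hd, hab]]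
            rw [htr]
            rw [PySem.List.slice_natCast]
  · next hj =>
      have hnil : pairs.drop j = [] := List.drop_eq_nil_of_le (by omega)
      rw [hnil, pvSplit_nil]
termination_by pairs.length - j
decreasing_by
  all_goals omega

-- ===== VERDICT (by name: the statement is the Claim_ definition above) =====
theorem hist2clusters_spec : Claim_equal_hist2clusters := by
  intro hist _
  unfold Spec_hist2clusters hist2clusters hist2clusters_alt
  rw [pvFoldA_enum]
  have h1 := (pvMain (PySem.List.enumerate hist 0)).1 []
  simp only [List.nil_append] at h1
  have h2 := pvOuterB_eq_pvSplit (PySem.List.enumerate hist 0) 0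
  rw [List.drop_zero] at h2
  rw [h1]
  exact h2.symm
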